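-- pv_equiv track=rewrite | github.com/jingshanghonoka10-jpg/mypython-Atcoder | mypython-Atcoder/ABC-220-B.py | ary_system
-- ===== SOURCE A (Python) =====
-- def ary_system(num,n):
--
--     ans = 0
--     i = 0
--
--     #1桁ずつ取り出して計算
--     while num > 0:
--         ans += (num % 10) * n**i
--         num = num // 10
--         i += 1         #　←　+=　を反転して書いてしまった,解けなかった原因
--
--     return ans
-- ===== SOURCE B (Python) =====
-- def ary_system(num, n):
--     if num <= 0:
--         return 0
--     ans = 0
--     for ch in str(num):
--         ans = ans * n + int(ch)
--     return ans
-- ===== Notes on version B (the rewrite author's own statement) =====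
-- stated objective: idiomatic
-- what changed: Replaces the least-significant-first power-sum loop (num % 10 * n**i with a growing exponent) by a single most-significant-first Horner pass over str(num) maintaining one accumulator ans = ans*n + int(ch).
import Mathlib
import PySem

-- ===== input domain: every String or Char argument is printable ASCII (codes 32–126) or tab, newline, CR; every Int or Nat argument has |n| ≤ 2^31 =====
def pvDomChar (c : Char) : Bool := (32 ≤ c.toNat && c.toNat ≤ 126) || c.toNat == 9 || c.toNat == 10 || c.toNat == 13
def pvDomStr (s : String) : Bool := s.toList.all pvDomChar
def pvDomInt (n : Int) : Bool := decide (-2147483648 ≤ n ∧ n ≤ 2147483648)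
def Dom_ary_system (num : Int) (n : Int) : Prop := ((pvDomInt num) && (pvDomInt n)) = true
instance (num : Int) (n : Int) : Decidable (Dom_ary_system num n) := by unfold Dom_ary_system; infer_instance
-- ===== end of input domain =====

-- B replaces A's least-significant-first power-sum loop by a Horner pass over str(num) (same values; return-value equivalence).
-- ===== PORT A =====
-- the while-loop of A, state (num, ans, i); n is the carried parameter
def aryLoop (num : Int) (ans : Int) (i : Nat) (n : Int) : Int :=
  if h : 0 < num then
    aryLoop (PySem.Int.floordiv num 10) (ans + PySem.Int.mod num 10 * n ^ i) (i + 1) n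
  else ans
termination_by num.toNat
decreasing_by
  have h1 : PySem.Int.floordiv num 10 = num / 10 := by
    simp [PySem.Int.floordiv, Int.fdiv_eq_ediv]
  rw [h1]; omega

def ary_system (num : Int) (n : Int) : Int := aryLoop num 0 0 n

-- ===== PORT B =====
-- int(ch) is ported by hand as (code - 48): exact on the digit characters str(num) of a positive int consists of
def ary_system_alt (num : Int) (n : Int) : Int :=
  if num ≤ 0 then 0
  else (PySem.Int.toStr num).toList.foldl (fun ans c => ans * n + ((c.toNat : Int) - 48)) 0

-- ===== PRECONDITION & SPEC =====
def Spec_ary_system (num : Int) (n : Int) (out : Int) : Prop := out = ary_system_alt num n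
instance (num : Int) (n : Int) (out : Int) : Decidable (Spec_ary_system num n out) := by unfold Spec_ary_system; infer_instance

-- ===== CLAIM (what is proved, stated in full; the proofs are below) =====
def Claim_equal_ary_system : Prop := ∀ (num : Int) (n : Int), Dom_ary_system num n → Spec_ary_system num n (ary_system num n)

-- ===== LEMMAS AND PROOFS =====

-- ===== VERDICT (by name: the statement is the Claim_ definition above) =====
-- toDigitsCore ignores extra fuel
lemma tdc_fuel : ∀ (m f₁ f₂ : Nat) (ds : List Char), m < f₁ → m < f₂ →
    Nat.toDigitsCore 10 f₁ m ds = Nat.toDigitsCore 10 f₂ m ds := by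
  intro m
  induction m using Nat.strong_induction_on with
  | _ m ih =>
    intro f₁ f₂ ds h1 h2
    cases f₁ with
    | zero => omega
    | succ g₁ =>
      cases f₂ with
      | zero => omega
      | succ g₂ =>
        simp only [Nat.toDigitsCore]
        by_cases hz : m / 10 = 0
        · simp [hz]
        · simp only [hz, ite_false]
          have hm : 0 < m := by omega
          have hlt : m / 10 < m := Nat.div_lt_self hm (by norm_num)
          exact ih (m / 10) hlt g₁ g₂ _ (by omega) (by omega)

-- the accumulator of toDigitsCore is a plain suffix
lemma tdc_acc : ∀ (f m : Nat) (ds : List Char),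
    Nat.toDigitsCore 10 f m ds = Nat.toDigitsCore 10 f m [] ++ ds := by
  intro f
  induction f with
  | zero => simp [Nat.toDigitsCore]
  | succ g ih =>
    intro m ds
    simp only [Nat.toDigitsCore]
    by_cases hz : m / 10 = 0
    · simp [hz]
    · simp only [hz, ite_false]
      rw [ih (m / 10) ((m % 10).digitChar :: ds), ih (m / 10) [(m % 10).digitChar]]
      simp

lemma toDigits_split (m : Nat) (h : 10 ≤ m) :
    Nat.toDigits 10 m = Nat.toDigits 10 (m / 10) ++ [Nat.digitChar (m % 10)] := by
  have hz : m / 10 ≠ 0 := by omega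
  have hlt : m / 10 < m := Nat.div_lt_self (by omega) (by norm_num)
  unfold Nat.toDigits
  conv_lhs => simp only [Nat.toDigitsCore]
  simp only [hz, ite_false]
  rw [tdc_acc m (m / 10) [(m % 10).digitChar]]
  rw [tdc_fuel (m / 10) m (m / 10 + 1) [] (by omega) (by omega)]

lemma toDigits_small (m : Nat) (h : m < 10) :
    Nat.toDigits 10 m = [Nat.digitChar m] := by
  unfold Nat.toDigits
  simp [Nat.toDigitsCore, Nat.div_eq_of_lt h, Nat.mod_eq_of_lt h]

lemma toDigits_eq_digits_rev : ∀ (m : Nat), 0 < m →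
    Nat.toDigits 10 m = ((Nat.digits 10 m).map Nat.digitChar).reverse := by
  intro m
  induction m using Nat.strong_induction_on with
  | _ m ih =>
    intro hm
    rw [Nat.digits_def' (by norm_num : (1:Nat) < 10) hm]
    by_cases h : m < 10
    · have h10 : m / 10 = 0 := Nat.div_eq_of_lt h
      rw [toDigits_small m h, Nat.mod_eq_of_lt h, h10]
      simp
    · rw [toDigits_split m (by omega)]
      have hdp : 0 < m / 10 := by
        have := Nat.div_pos (le_of_not_gt h) (by norm_num : 0 < 10)
        omega
      rw [ih (m / 10) (Nat.div_lt_self hm (by norm_num)) hdp]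
      simp

lemma digitChar_val (d : Nat) (h : d < 10) : ((Nat.digitChar d).toNat : Int) - 48 = d := by
  interval_cases d <;> decide

lemma horner_eq (n : Int) : ∀ (ds : List Nat) (acc : Int), (∀ d ∈ ds, d < 10) →
    ((ds.map Nat.digitChar).reverse).foldl (fun a c => a * n + ((c.toNat : Int) - 48)) acc
      = acc * n ^ ds.length + Nat.ofDigits n ds := by
  intro ds
  induction ds with
  | nil => intro acc _; simp [Nat.ofDigits]
  | cons d ds ih =>
    intro acc hlt
    simp only [List.map_cons, List.reverse_cons, List.foldl_append, List.foldl_cons,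
      List.foldl_nil]
    rw [ih acc (fun x hx => hlt x (List.mem_cons_of_mem d hx))]
    rw [digitChar_val d (hlt d (List.mem_cons_self))]
    simp only [List.length_cons, Nat.ofDigits]
    ring

lemma aryLoop_eq (num ans : Int) (i : Nat) (n : Int) :
    aryLoop num ans i n = ans + n ^ i * Nat.ofDigits n (Nat.digits 10 num.toNat) := by
  induction num, ans, i using aryLoop.induct n with
  | case1 num ans i h ih =>
    rw [aryLoop, dif_pos h, ih]
    have hd : PySem.Int.floordiv num 10 = num / 10 := by
      simp [PySem.Int.floordiv, Int.fdiv_eq_ediv]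
    have hm : PySem.Int.mod num 10 = num % 10 := by
      simp [PySem.Int.mod, Int.fmod_eq_emod]
    have h0 : 0 < num.toNat := by omega
    rw [hd, hm, Nat.digits_def' (by norm_num : (1:Nat) < 10) h0]
    simp only [Nat.ofDigits]
    have e1 : (num / 10).toNat = num.toNat / 10 := by omega
    have e2 : ((num.toNat % 10 : Nat) : Int) = num % 10 := by omega
    rw [e1, e2]
    ring
  | case2 num ans i h =>
    rw [aryLoop, dif_neg h]
    have hz : num.toNat = 0 := by omega
    have hzero : Nat.ofDigits n (Nat.digits 10 num.toNat) = 0 := by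
      rw [hz]; simp [Nat.ofDigits]
    rw [hzero]; ring

theorem ary_system_spec : Claim_equal_ary_system := by
  intro num n _
  unfold Spec_ary_system ary_system ary_system_alt
  by_cases h : num ≤ 0
  · rw [if_pos h, aryLoop_eq]
    have hz : num.toNat = 0 := by omega
    simp [hz, Nat.ofDigits]
  · rw [if_neg h, aryLoop_eq]
    have hpos : 0 < num := by omega
    have hneg : ¬ num < 0 := by omega
    have hts : (PySem.Int.toStr num).toList = Nat.toDigits 10 num.toNat := by
      rw [PySem.Int.toList_toStr]
      simp [PySem.Int.toChars, hneg]
    rw [hts, toDigits_eq_digits_rev num.toNat (by omega)]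
    rw [horner_eq n (Nat.digits 10 num.toNat) 0
      (fun d hd => Nat.digits_lt_base (by norm_num) hd)]
    simp
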